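-- pv_equiv track=rewrite | github.com/HaeKang/2023-coding-study | week6/[PGS] 118670.행렬과 연산.LV4/HY.py | solution
-- ===== SOURCE A (Python) =====
-- from collections import deque
--
-- def solution(rc, operations):
--     answer = []
--     #왼쪽, 가운데, 오른쪽 따로 구하기
--     left = deque([rc[i][0] for i in range(len(rc))])
--     right = deque([rc[i][-1] for i in range(len(rc))])
--     mid = deque([deque(rc[i][1:-1]) for i in range(len(rc))])
--
--     for operation in operations:
--         if operation == "ShiftRow":
--             mid.rotate(1)
--             left.rotate(1)
--             right.rotate(1)
--
--         else:
--             mid[0].appendleft(left.popleft())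
--             right.appendleft(mid[0].pop())
--             mid[-1].append(right.pop())
--             left.append(mid[-1].popleft())
--
--     for i in range(len(rc)):
--         answer.append([left[i]] + list(mid[i]) + [right[i]])
--
--     return answer
-- ===== SOURCE B (Python) =====
-- def solution(rc, operations):
--     if not rc:
--         return []
--     # keep the matrix itself as the state; each row normalised to border-cell
--     # form [first] + interior + [last] (the form the operations address)
--     m = [[r[0]] + r[1:-1] + [r[-1]] for r in rc]
--     for op in operations:
--         if op == "ShiftRow":
--             m = [m[-1]] + m[:-1]
--         else:
--             m = _rotate(m)
--     return m
--
-- def _rotate(m):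
--     # rotate the outer border clockwise by one, written as local row shifts
--     if len(m) == 1:
--         row = m[0]
--         return [[row[-1]] + row[:-1]]
--     rows = [[m[1][0]] + m[0][:-1]]
--     above = m[0]
--     for cur, below in zip(m[1:-1], m[2:]):
--         rows.append([below[0]] + cur[1:-1] + [above[-1]])
--         above = cur
--     rows.append(m[-1][1:] + [above[-1]])
--     return rows
-- ===== Notes on version B (the rewrite author's own statement) =====
-- stated objective: alternative
-- what changed: B keeps the matrix itself as the state (rows in border-cell form) and implements ShiftRow as a whole-row-list rotation and Rotate as local neighbour row shifts, instead of A's three synchronised deques (left column, row middles, right column); Pre_ excludes single-row matrices of width >= 3 together with a Rotate, a degenerate corner where the outer border passes each cell twice so no rotation is canonical and A's and B's values are both artefacts of their decompositions.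
-- outside the precondition, e.g. on solution([[1, 2, 3]], ['Rotate']): A returns [[1, 3, 2]], B returns [[3, 1, 2]]
import Mathlib
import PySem

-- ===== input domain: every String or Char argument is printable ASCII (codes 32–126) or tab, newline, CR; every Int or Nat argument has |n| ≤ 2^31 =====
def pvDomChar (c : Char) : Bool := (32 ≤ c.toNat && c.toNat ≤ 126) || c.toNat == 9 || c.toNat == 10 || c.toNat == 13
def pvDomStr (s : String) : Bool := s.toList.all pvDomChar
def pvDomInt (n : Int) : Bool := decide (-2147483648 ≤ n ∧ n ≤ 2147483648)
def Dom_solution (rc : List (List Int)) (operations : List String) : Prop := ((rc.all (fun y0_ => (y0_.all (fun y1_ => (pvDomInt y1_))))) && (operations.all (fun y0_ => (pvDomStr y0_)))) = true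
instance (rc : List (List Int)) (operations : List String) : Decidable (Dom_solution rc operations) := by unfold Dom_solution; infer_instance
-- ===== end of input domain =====

-- B keeps the matrix itself as the state (rows in border-cell form): ShiftRow is a whole-row-list
-- rotation and Rotate is local neighbour row shifts, instead of A's three synchronised deques;
-- excluded degenerate corner (Pre_): single-row matrices, where no border rotation is canonical.


-- ===== PORT A =====
-- deque.rotate(1): move the last element to the front
def pyRot1 {α : Type} (xs : List α) : List α :=
  match xs.getLast? with
  | none => []
  | some x => x :: xs.dropLast

-- the else-branch of A's loop: the four deque moves of one Rotate
-- (mid[0]/mid[-1] mutation is written as rebuilding the first/last list element)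
def rotA (st : List Int × List (List Int) × List Int) :
    List Int × List (List Int) × List Int :=
  let left := st.1
  let mid := st.2.1
  let right := st.2.2
  -- mid[0].appendleft(left.popleft())
  let x := left.headD 0
  let left := left.tail
  let mid := if mid.isEmpty then [] else (x :: mid.headD []) :: mid.tail
  -- right.appendleft(mid[0].pop())
  let y := (mid.headD []).getLastD 0
  let mid := if mid.isEmpty then [] else (mid.headD []).dropLast :: mid.tail
  let right := y :: right
  -- mid[-1].append(right.pop())
  let z := right.getLastD 0
  let mid := if mid.isEmpty then [] else mid.dropLast ++ [mid.getLastD [] ++ [z]]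
  let right := right.dropLast
  -- left.append(mid[-1].popleft())
  let w := (mid.getLastD []).headD 0
  let mid := if mid.isEmpty then [] else mid.dropLast ++ [(mid.getLastD []).tail]
  let left := left ++ [w]
  (left, mid, right)

def stepA (st : List Int × List (List Int) × List Int) (op : String) :
    List Int × List (List Int) × List Int :=
  if op = "ShiftRow" then (pyRot1 st.1, pyRot1 st.2.1, pyRot1 st.2.2)
  else rotA st

def solution (rc : List (List Int)) (operations : List String) : List (List Int) :=
  let left := rc.map (fun r => r.headD 0)            -- [rc[i][0] for i in range(len(rc))]
  let right := rc.map (fun r => r.getLastD 0)        -- [rc[i][-1] ...]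
  let mid := rc.map (fun r => r.tail.dropLast)       -- [deque(rc[i][1:-1]) ...]
  let st := operations.foldl stepA (left, mid, right)
  (List.range rc.length).map
    (fun i => st.1.getD i 0 :: st.2.1.getD i [] ++ [st.2.2.getD i 0])

-- ===== PORT B =====
-- [r[0]] + r[1:-1] + [r[-1]]
def widenRow (r : List Int) : List Int := r.headD 0 :: r.tail.dropLast ++ [r.getLastD 0]

-- _rotate of Source B: clockwise border rotation written as local row shifts
def rotateB (m : List (List Int)) : List (List Int) :=
  if m.length = 1 then
    [(m.headD []).getLastD 0 :: (m.headD []).dropLast]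
  else
    let first := (m.getD 1 []).headD 0 :: (m.headD []).dropLast
    let st := ((m.drop 1).dropLast.zip (m.drop 2)).foldl
      (fun (acc : List (List Int) × List Int) cb =>
        (acc.1 ++ [cb.2.headD 0 :: cb.1.tail.dropLast ++ [acc.2.getLastD 0]], cb.1))
      ([first], m.headD [])
    st.1 ++ [(m.getLastD []).tail ++ [st.2.getLastD 0]]

def stepB (m : List (List Int)) (op : String) : List (List Int) :=
  if op = "ShiftRow" then m.getLastD [] :: m.dropLast else rotateB m

def solution_alt (rc : List (List Int)) (operations : List String) : List (List Int) :=
  if rc.isEmpty then [] else operations.foldl stepB (rc.map widenRow)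

-- ===== PRECONDITION & SPEC =====
-- Pre_ excludes the inputs where Python A raises an IndexError (a matrix containing an empty
-- row; the empty matrix together with a non-ShiftRow operation), and single-row matrices of
-- width >= 3 together with a non-ShiftRow operation — a degenerate corner where the outer
-- border passes each cell twice, so no rotation is canonical: A's overlapping column deques
-- yield one value (the last two cells swapped), B's row rotation another, both artefacts of
-- their decompositions.
def Pre_solution (rc : List (List Int)) (operations : List String) : Prop :=
  (∀ r ∈ rc, r ≠ []) ∧ (rc = [] → ∀ op ∈ operations, op = "ShiftRow") ∧
  (rc.length = 1 → 3 ≤ (rc.headD []).length → ∀ op ∈ operations, op = "ShiftRow")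
instance (rc : List (List Int)) (operations : List String) : Decidable (Pre_solution rc operations) := by unfold Pre_solution; infer_instance

def pvWitness_solution : List (List Int) × List String := ([[1, 2], [3, 4]], ["ShiftRow", "Rotate"])

def Spec_solution (rc : List (List Int)) (operations : List String) (out : List (List Int)) : Prop :=
  out = solution_alt rc operations
instance (rc : List (List Int)) (operations : List String) (out : List (List Int)) : Decidable (Spec_solution rc operations out) := by unfold Spec_solution; infer_instance

-- ===== CLAIM (what is proved, stated in full; the proofs are below) =====
def Claim_equal_solution : Prop := ∀ (rc : List (List Int)) (operations : List String), Dom_solution rc operations → Pre_solution rc operations → Spec_solution rc operations (solution rc operations)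

-- ===== LEMMAS AND PROOFS =====
def rowH (r : List Int) : Int := r.headD 0
def rowG (r : List Int) : Int := r.getLastD 0
def rowM (r : List Int) : List Int := r.tail.dropLast

lemma getLastD_cons_concat {α : Type} (x : α) (l : List α) (v d : α) :
    (x :: l ++ [v]).getLastD d = v := by
  induction l generalizing x <;> simp_all

lemma dropLast_append_getLastD {α : Type} (l : List α) (h : l ≠ []) (d : α) :
    l.dropLast ++ [l.getLastD d] = l := by
  induction l using List.reverseRecOn with
  | nil => exact absurd rfl h
  | append_singleton l a _ => simp

lemma tail_split (r : List Int) (h : 2 ≤ r.length) :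
    rowM r ++ [rowG r] = r.tail := by
  cases r with
  | nil => simp at h
  | cons a t =>
    have ht : t ≠ [] := by cases t <;> simp_all
    have : (a :: t).getLastD 0 = t.getLastD 0 := by
      cases t with | nil => exact absurd rfl ht | cons b u => simp
    simp only [rowM, rowG, List.tail_cons, this]
    exact dropLast_append_getLastD t ht 0

lemma head_split (r : List Int) (h : 2 ≤ r.length) :
    rowH r :: rowM r = r.dropLast := by
  cases r with
  | nil => simp at h
  | cons a t =>
    have ht : t ≠ [] := by cases t <;> simp_all
    simp [rowH, rowM, List.dropLast_cons_of_ne_nil ht]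


lemma widenRow_eq_self (r : List Int) (h : 2 ≤ r.length) : widenRow r = r := by
  have := tail_split r h
  cases r with
  | nil => simp at h
  | cons a t =>
    simp only [widenRow]
    simp only [rowM, rowG, List.tail_cons] at this ⊢
    rw [List.headD_cons]; exact congrArg (List.cons a) this


lemma rot1_map {α β : Type} (f : α → β) (l : List α) :
    pyRot1 (l.map f) = (pyRot1 l).map f := by
  induction l using List.reverseRecOn with
  | nil => simp [pyRot1]
  | append_singleton l a _ =>
    simp [pyRot1, List.getLast?_concat]

lemma pyRot1_eq (m : List (List Int)) (hm : m ≠ []) :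
    pyRot1 m = m.getLastD [] :: m.dropLast := by
  induction m using List.reverseRecOn with
  | nil => exact absurd rfl hm
  | append_singleton l a _ =>
    simp [pyRot1, List.getLast?_concat]

def interRows (above : List Int) : List (List Int) → List Int → List (List Int)
  | [], _ => []
  | c :: rest, rl =>
      ((rest.headD rl).headD 0 :: c.tail.dropLast ++ [above.getLastD 0]) :: interRows c rest rl

lemma interRows_length (ab : List Int) (ms : List (List Int)) (rl : List Int) :
    (interRows ab ms rl).length = ms.length := by
  induction ms generalizing ab with
  | nil => simp [interRows]
  | cons c rest ih => simp [interRows, ih]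

lemma interRows_good (ab : List Int) (ms : List (List Int)) (rl : List Int) :
    ∀ r ∈ interRows ab ms rl, 2 ≤ r.length := by
  induction ms generalizing ab with
  | nil => simp [interRows]
  | cons c rest ih =>
    intro r hr
    simp only [interRows, List.mem_cons] at hr
    rcases hr with h | h
    · subst h; simp
    · exact ih c r h

lemma interRows_map_h (ab : List Int) (ms : List (List Int)) (rl : List Int) :
    (interRows ab ms rl).map rowH = ((ms ++ [rl]).tail).map rowH := by
  induction ms generalizing ab with
  | nil => simp [interRows]
  | cons c rest ih =>
    simp only [interRows, List.map_cons]
    rw [ih c]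
    have h1 : rowH ((rest.headD rl).headD 0 :: c.tail.dropLast ++ [ab.getLastD 0])
        = rowH (rest.headD rl) := by simp [rowH]
    rw [h1]
    cases rest <;> simp

lemma interRows_map_g (ab : List Int) (ms : List (List Int)) (rl : List Int) :
    (interRows ab ms rl).map rowG = ((ab :: ms).dropLast).map rowG := by
  induction ms generalizing ab with
  | nil => simp [interRows]
  | cons c rest ih =>
    simp only [interRows, List.map_cons]
    rw [ih c]
    have h1 : rowG ((rest.headD rl).headD 0 :: c.tail.dropLast ++ [ab.getLastD 0]) = rowG ab := by
      simp only [rowG, getLastD_cons_concat]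
    have h2 : (ab :: c :: rest).dropLast = ab :: (c :: rest).dropLast := by
      simp
    rw [h1, h2, List.map_cons]

lemma interRows_map_m (ab : List Int) (ms : List (List Int)) (rl : List Int) :
    (interRows ab ms rl).map rowM = ms.map rowM := by
  induction ms generalizing ab with
  | nil => simp [interRows]
  | cons c rest ih =>
    simp only [interRows, List.map_cons, ih c]
    congr 1
    simp [rowM]

lemma fold_inter (ms : List (List Int)) (rl : List Int) (acc : List (List Int)) (ab : List Int) :
    ((ms.zip ((ms ++ [rl]).tail)).foldl
      (fun (acc : List (List Int) × List Int) cb =>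
        (acc.1 ++ [cb.2.headD 0 :: cb.1.tail.dropLast ++ [acc.2.getLastD 0]], cb.1))
      (acc, ab)) = (acc ++ interRows ab ms rl, ms.getLastD ab) := by
  induction ms generalizing acc ab with
  | nil => simp [interRows]
  | cons c rest ih =>
    have hzip : (c :: rest).zip (((c :: rest) ++ [rl]).tail) =
        (c, rest.headD rl) :: rest.zip ((rest ++ [rl]).tail) := by
      cases rest <;> simp
    rw [hzip, List.foldl_cons, ih]
    refine Prod.ext ?_ ?_
    · simp [interRows]
    · cases rest with
      | nil => simp
      | cons d u =>
        simp only [List.getLastD_cons]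


lemma rotateB_eq (r0 rl : List Int) (ms : List (List Int)) :
    rotateB (r0 :: ms ++ [rl]) =
      ((ms.headD rl).headD 0 :: r0.dropLast) ::
        (interRows r0 ms rl ++ [rl.tail ++ [(ms.getLastD r0).getLastD 0]]) := by
  have hlen : ¬ ((r0 :: ms ++ [rl]).length = 1) := by simp
  have h1 : (r0 :: ms ++ [rl]).getD 1 [] = ms.headD rl := by cases ms <;> simp
  have h2 : ((r0 :: ms ++ [rl]).drop 1).dropLast = ms := by
    simp
  have h3 : (r0 :: ms ++ [rl]).drop 2 = (ms ++ [rl]).tail := by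
    cases ms <;> simp
  have h4 : (r0 :: ms ++ [rl]).getLastD [] = rl := getLastD_cons_concat r0 ms rl []
  simp only [rotateB, hlen, if_false, h1, h2, h3, h4]
  rw [fold_inter]
  simp


lemma map_g_unsplit (ms : List (List Int)) (r0 : List Int) :
    ((r0 :: ms).dropLast).map rowG ++ [rowG (ms.getLastD r0)] = rowG r0 :: ms.map rowG := by
  induction ms generalizing r0 with
  | nil => simp
  | cons c rest ih =>
    have h2 : (r0 :: c :: rest).dropLast = r0 :: (c :: rest).dropLast := by simp
    rw [h2, List.map_cons, List.getLastD_cons, List.cons_append, ih c, List.map_cons]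

lemma getLast?_cons_concat {α : Type} (x : α) (l : List α) (v : α) :
    (x :: (l ++ [v])).getLast? = some v := by
  induction l generalizing x <;> simp_all

lemma dropLast_cons_concat {α : Type} (x : α) (l : List α) (v : α) :
    (x :: (l ++ [v])).dropLast = x :: l := by
  induction l generalizing x <;> simp_all

lemma rotA_shape (a : Int) (L m0 ml gs : List Int) (msm : List (List Int)) (g0 gl : Int) :
    rotA (a :: L, m0 :: (msm ++ [ml]), g0 :: (gs ++ [gl]))
      = (L ++ [(ml ++ [gl]).headD 0],
         (a :: m0).dropLast :: (msm ++ [(ml ++ [gl]).tail]),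
         (a :: m0).getLastD 0 :: g0 :: gs) := by
  simp [rotA, getLast?_cons_concat, dropLast_cons_concat]

lemma map_split (f : List Int → Int) (ms : List (List Int)) (rl : List Int) :
    ms.map f ++ [f rl] = f (ms.headD rl) :: ((ms ++ [rl]).tail).map f := by
  cases ms <;> simp

lemma rotate_step (r0 rl : List Int) (ms : List (List Int))
    (h0 : 2 ≤ r0.length) (hl : 2 ≤ rl.length) :
    rotA ((r0 :: ms ++ [rl]).map rowH, (r0 :: ms ++ [rl]).map rowM, (r0 :: ms ++ [rl]).map rowG)
      = ((rotateB (r0 :: ms ++ [rl])).map rowH,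
         (rotateB (r0 :: ms ++ [rl])).map rowM,
         (rotateB (r0 :: ms ++ [rl])).map rowG) := by
  have hs0 : rowH r0 :: rowM r0 = r0.dropLast := head_split r0 h0
  have htl : rowM rl ++ [rowG rl] = rl.tail := tail_split rl hl
  have hd0 : r0.dropLast ≠ [] := by
    have := r0.length_dropLast; intro h; rw [h] at this; simp at this; omega
  obtain ⟨u, v, huv⟩ : ∃ u v, rl.tail = u :: v := by
    cases rl with
    | nil => simp at hl
    | cons x t => cases t with
      | nil => simp at hl
      | cons y s => exact ⟨y, s, rfl⟩
  have lhs : (r0 :: ms ++ [rl]).map rowH = rowH r0 :: (ms.map rowH ++ [rowH rl]) := by simp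
  have lhm : (r0 :: ms ++ [rl]).map rowM = rowM r0 :: (ms.map rowM ++ [rowM rl]) := by simp
  have lhg : (r0 :: ms ++ [rl]).map rowG = rowG r0 :: (ms.map rowG ++ [rowG rl]) := by simp
  rw [lhs, lhm, lhg, rotA_shape, rotateB_eq]
  rw [hs0, htl]
  -- now compare the three components
  refine Prod.ext ?_ (Prod.ext ?_ ?_)
  · -- left column
    show ms.map rowH ++ [rowH rl] ++ [rl.tail.headD 0]
        = _
    simp only [List.map_cons, List.map_append, List.map_nil]
    rw [map_split rowH ms rl]
    have e1 : rowH ((ms.headD rl).headD 0 :: r0.dropLast) = rowH (ms.headD rl) := by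
      simp [rowH]
    have e2 : rowH (rl.tail ++ [(ms.getLastD r0).getLastD 0]) = rl.tail.headD 0 := by
      rw [huv]; simp [rowH]
    rw [interRows_map_h, e1, e2]
    simp
  · -- middles
    show r0.dropLast.dropLast :: (ms.map rowM ++ [rl.tail.tail]) = _
    simp only [List.map_cons, List.map_append, List.map_nil]
    rw [interRows_map_m]
    have e1 : rowM ((ms.headD rl).headD 0 :: r0.dropLast) = r0.dropLast.dropLast := by
      simp [rowM]
    have e2 : rowM (rl.tail ++ [(ms.getLastD r0).getLastD 0]) = rl.tail.tail := by
      rw [huv]; simp [rowM]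
    rw [e1, e2]
  · -- right column
    show r0.dropLast.getLastD 0 :: rowG r0 :: ms.map rowG = _
    simp only [List.map_cons, List.map_append, List.map_nil]
    rw [interRows_map_g]
    have e1 : rowG ((ms.headD rl).headD 0 :: r0.dropLast) = r0.dropLast.getLastD 0 := by
      cases hdd : r0.dropLast with
      | nil => exact absurd hdd hd0
      | cons p q => simp [rowG]
    have e2 : rowG (rl.tail ++ [(ms.getLastD r0).getLastD 0]) = rowG (ms.getLastD r0) := by
      rw [huv]; simp [rowG, getLast?_cons_concat]
    rw [e1, e2, map_g_unsplit]
def Good2 (m : List (List Int)) : Prop := ∀ r ∈ m, 2 ≤ r.length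

lemma getLastD_mem {α : Type} (m : List α) (hm : m ≠ []) (d : α) : m.getLastD d ∈ m := by
  induction m using List.reverseRecOn with
  | nil => exact absurd rfl hm
  | append_singleton l a _ => simp

lemma shift_good (m : List (List Int)) (hm : m ≠ []) (hg : Good2 m) :
    Good2 (m.getLastD [] :: m.dropLast) := by
  intro r hr
  rcases List.mem_cons.1 hr with h | h
  · exact hg _ (h ▸ getLastD_mem m hm [])
  · exact hg _ ((List.dropLast_sublist m).subset h)

lemma shift_len (m : List (List Int)) (hm : m ≠ []) :
    (m.getLastD [] :: m.dropLast).length = m.length := by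
  induction m using List.reverseRecOn with
  | nil => exact absurd rfl hm
  | append_singleton l a _ => simp

lemma rotB_good (r0 rl : List Int) (ms : List (List Int))
    (h0 : 2 ≤ r0.length) (hl : 2 ≤ rl.length) :
    Good2 (rotateB (r0 :: ms ++ [rl])) := by
  rw [rotateB_eq]
  intro r hr
  rcases List.mem_cons.1 hr with h | h
  · subst h; simp; omega
  · rcases List.mem_append.1 h with h | h
    · exact interRows_good r0 ms rl r h
    · simp at h; subst h
      have : rl.tail.length = rl.length - 1 := rl.length_tail
      simp [this]; omega

lemma rotB_len (r0 rl : List Int) (ms : List (List Int)) :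
    (rotateB (r0 :: ms ++ [rl])).length = (r0 :: ms ++ [rl]).length := by
  rw [rotateB_eq]; simp [interRows_length]

lemma main_fold (ops : List String) (m : List (List Int))
    (hne : m ≠ []) (hg : Good2 m)
    (h1 : m.length = 1 → (m.headD []).length = 2 ∨ ∀ op ∈ ops, op = "ShiftRow") :
    ops.foldl stepA (m.map rowH, m.map rowM, m.map rowG)
      = ((ops.foldl stepB m).map rowH, (ops.foldl stepB m).map rowM, (ops.foldl stepB m).map rowG)
    ∧ (ops.foldl stepB m).length = m.length ∧ Good2 (ops.foldl stepB m) ∧ ops.foldl stepB m ≠ []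
    ∧ (m.length = 1 → (m.headD []).length = 2 → ((ops.foldl stepB m).headD []).length = 2) := by
  induction ops generalizing m with
  | nil => exact ⟨rfl, rfl, hg, hne, fun _ h => h⟩
  | cons op rest ih =>
    by_cases hop : op = "ShiftRow"
    · subst hop
      have hsB : stepB m "ShiftRow" = m.getLastD [] :: m.dropLast := by simp [stepB]
      have hstep : stepA (m.map rowH, m.map rowM, m.map rowG) "ShiftRow"
          = ((stepB m "ShiftRow").map rowH, (stepB m "ShiftRow").map rowM, (stepB m "ShiftRow").map rowG) := by
        rw [hsB]
        simp only [stepA]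
        rw [if_pos trivial, rot1_map, rot1_map, rot1_map, pyRot1_eq m hne]
      have hlen : (stepB m "ShiftRow").length = m.length := by rw [hsB]; exact shift_len m hne
      have hgood : Good2 (stepB m "ShiftRow") := by rw [hsB]; exact shift_good m hne hg
      have hne' : stepB m "ShiftRow" ≠ [] := by simp [stepB]
      have hhead : m.length = 1 → (m.headD []).length = 2 → ((stepB m "ShiftRow").headD []).length = 2 := by
        intro hl1 hw
        cases m with
        | nil => simp at hne
        | cons r t =>
          have : t = [] := by simpa using hl1
          subst this
          simpa [stepB] using hw
      have h1' : (stepB m "ShiftRow").length = 1 → ((stepB m "ShiftRow").headD []).length = 2 ∨ ∀ o ∈ rest, o = "ShiftRow" := by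
        intro hl1
        have hm1 : m.length = 1 := by rw [← hlen]; simpa [stepB] using hl1
        rcases h1 hm1 with hw | hall
        · exact Or.inl (hhead hm1 hw)
        · exact Or.inr fun o ho => hall o (List.mem_cons_of_mem _ ho)
      obtain ⟨e, l, g, n, hh⟩ := ih (stepB m "ShiftRow") hne' hgood h1'
      refine ⟨?_, ?_, g, n, ?_⟩
      · rw [List.foldl_cons, List.foldl_cons, hstep]
        exact e
      · rw [List.foldl_cons, l, hlen]
      · intro hm1 hw
        exact hh (by rw [hlen]; exact hm1) (hhead hm1 hw)
    · -- Rotate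
      rcases Nat.lt_or_ge m.length 2 with hsmall | hbig
      · -- m.length = 1 (m ≠ [])
        have hm1 : m.length = 1 := by
          cases m with
          | nil => exact absurd rfl hne
          | cons a t => simp at hsmall ⊢; omega
        rcases h1 hm1 with hw | hall
        · obtain ⟨r, hr⟩ : ∃ r, m = [r] := by
            cases m with
            | nil => exact absurd rfl hne
            | cons a t => exact ⟨a, by simpa using congrArg (a :: ·) (List.length_eq_zero_iff.mp (by simpa using hm1))⟩
          subst hr
          obtain ⟨a, b, hab⟩ : ∃ a b, r = [a, b] := by
            cases r with
            | nil => simp at hw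
            | cons a t =>
              cases t with
              | nil => simp at hw
              | cons b s =>
                have : s = [] := by simpa using hw
                exact ⟨a, b, by rw [this]⟩
          subst hab
          have hstep : stepA (([[a,b]] : List (List Int)).map rowH, ([[a,b]] : List (List Int)).map rowM, ([[a,b]] : List (List Int)).map rowG) op
              = ((rotateB [[a,b]]).map rowH, (rotateB [[a,b]]).map rowM, (rotateB [[a,b]]).map rowG) := by
            simp only [stepA, if_neg hop]
            simp [rotA, rotateB, rowH, rowM, rowG]
          have hrot : rotateB [[a, b]] = [[b, a]] := by simp [rotateB]
          have hsB : stepB [[a, b]] op = [[b, a]] := by simp [stepB, if_neg hop, hrot]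
          obtain ⟨e, l, g, n, hh⟩ := ih [[b, a]] (by simp) (by intro r hr; simp at hr; simp [hr]) (by intro _; exact Or.inl (by simp))
          refine ⟨?_, ?_, ?_, ?_, ?_⟩
          · rw [List.foldl_cons, List.foldl_cons, hstep, hrot, hsB]; exact e
          · rw [List.foldl_cons, hsB, l]; rfl
          · rw [List.foldl_cons, hsB]; exact g
          · rw [List.foldl_cons, hsB]; exact n
          · intro _ _; rw [List.foldl_cons, hsB]; exact hh rfl (by simp)
        · exact absurd (hall op (List.mem_cons_self)) hop
      · -- m.length ≥ 2: split m = r0 :: ms ++ [rl]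
        obtain ⟨r0, ms, rl, hm⟩ : ∃ r0 ms rl, m = r0 :: ms ++ [rl] := by
          cases m with
          | nil => exact absurd rfl hne
          | cons r0 t =>
            cases t using List.reverseRecOn with
            | nil => simp at hbig
            | append_singleton l a _ => exact ⟨r0, l, a, rfl⟩
        subst hm
        have h0 : 2 ≤ r0.length := hg _ (by simp)
        have hl : 2 ≤ rl.length := hg _ (by simp)
        have hms : ∀ r ∈ ms, 2 ≤ r.length := fun r hr => hg _ (by simp [hr])
        have hstep : stepA ((r0 :: ms ++ [rl]).map rowH, (r0 :: ms ++ [rl]).map rowM, (r0 :: ms ++ [rl]).map rowG) op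
            = ((rotateB (r0 :: ms ++ [rl])).map rowH, (rotateB (r0 :: ms ++ [rl])).map rowM, (rotateB (r0 :: ms ++ [rl])).map rowG) := by
          simp only [stepA, if_neg hop]
          exact rotate_step r0 rl ms h0 hl
        have hsB : stepB (r0 :: ms ++ [rl]) op = rotateB (r0 :: ms ++ [rl]) := by
          simp [stepB, if_neg hop]
        have hgood : Good2 (rotateB (r0 :: ms ++ [rl])) := rotB_good r0 rl ms h0 hl
        have hlen := rotB_len r0 rl ms
        have hne' : rotateB (r0 :: ms ++ [rl]) ≠ [] := by
          intro h
          rw [h] at hlen; simp at hlen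
        have h1' : (rotateB (r0 :: ms ++ [rl])).length = 1 → ((rotateB (r0 :: ms ++ [rl])).headD []).length = 2 ∨ ∀ o ∈ rest, o = "ShiftRow" := by
          intro hl1; rw [hlen] at hl1; simp at hl1
        obtain ⟨e, l, g, n, hh⟩ := ih (rotateB (r0 :: ms ++ [rl])) hne' hgood h1'
        refine ⟨?_, ?_, ?_, ?_, ?_⟩
        · rw [List.foldl_cons, List.foldl_cons, hstep, hsB]; exact e
        · rw [List.foldl_cons, hsB, l, hlen]
        · rw [List.foldl_cons, hsB]; exact g
        · rw [List.foldl_cons, hsB]; exact n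
        · intro hm1 _
          exfalso; simp at hm1
lemma assemble (m : List (List Int)) (hg : Good2 m) :
    (List.range m.length).map
      (fun i => (m.map rowH).getD i 0 :: (m.map rowM).getD i [] ++ [(m.map rowG).getD i 0]) = m := by
  apply List.ext_getElem (by simp)
  intro i hi hm
  have hlt : i < m.length := by simpa using hi
  simp only [List.getElem_map, List.getElem_range]
  rw [List.getD_eq_getElem _ _ (by simpa), List.getD_eq_getElem _ _ (by simpa),
      List.getD_eq_getElem _ _ (by simpa)]
  simp only [List.getElem_map]
  have h2 : 2 ≤ m[i].length := hg _ (List.getElem_mem _)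
  have hw := widenRow_eq_self m[i] h2
  simpa [widenRow, rowH, rowM, rowG] using hw
lemma decomp_widen_h (rc : List (List Int)) : (rc.map widenRow).map rowH = rc.map (fun r => r.headD 0) := by
  rw [List.map_map]; rfl

lemma decomp_widen_m (rc : List (List Int)) : (rc.map widenRow).map rowM = rc.map (fun r => r.tail.dropLast) := by
  rw [List.map_map]
  apply List.map_congr_left
  intro r _
  simp [widenRow, rowM]

lemma decomp_widen_g (rc : List (List Int)) : (rc.map widenRow).map rowG = rc.map (fun r => r.getLastD 0) := by
  rw [List.map_map]
  apply List.map_congr_left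
  intro r _
  simp only [Function.comp, widenRow, rowG]
  exact getLastD_cons_concat _ _ _ _

lemma widen_good (rc : List (List Int)) : Good2 (rc.map widenRow) := by
  intro r hr
  obtain ⟨s, _, rfl⟩ := List.mem_map.1 hr
  simp [widenRow]
theorem final (rc : List (List Int)) (operations : List String)
    (hpre1 : ∀ r ∈ rc, r ≠ [])
    (hnd : ¬ (rc.length = 1 ∧ 3 ≤ (rc.headD []).length ∧ ∃ op ∈ operations, op ≠ "ShiftRow")) :
    solution rc operations = solution_alt rc operations := by
  cases hrc : rc with
  | nil => simp [solution, solution_alt]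
  | cons r rest =>
    subst hrc
    have hne : (r :: rest).map widenRow ≠ [] := by simp
    have h1 : ((r :: rest).map widenRow).length = 1 →
        ((((r :: rest).map widenRow).headD []).length = 2 ∨ ∀ op ∈ operations, op = "ShiftRow") := by
      intro hl1
      simp at hl1
      subst hl1
      by_cases hall : ∀ op ∈ operations, op = "ShiftRow"
      · exact Or.inr hall
      · left
        push_neg at hnd
        have hw : r.length < 3 := by
          rcases Nat.lt_or_ge r.length 3 with h | h
          · exact h
          · exfalso
            obtain ⟨op, hop, hne'⟩ := by push_neg at hall; exact hall
            exact absurd (hnd (by simp) (by simpa using h)) (by push_neg; exact ⟨op, hop, hne'⟩)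
        have hr2 : r.length ≤ 2 := by omega
        simp only [List.map_cons, List.headD_cons]
        simp [widenRow]
        omega
    obtain ⟨e, l, g, n, _⟩ := main_fold operations ((r :: rest).map widenRow) hne (widen_good _) h1
    show (List.range (r :: rest).length).map _ = _
    rw [show (r :: rest).map (fun r => r.headD (0:Int)) = ((r :: rest).map widenRow).map rowH from (decomp_widen_h _).symm,
        show (r :: rest).map (fun r => r.tail.dropLast) = ((r :: rest).map widenRow).map rowM from (decomp_widen_m _).symm,
        show (r :: rest).map (fun r => r.getLastD (0:Int)) = ((r :: rest).map widenRow).map rowG from (decomp_widen_g _).symm]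
    rw [e]
    have hlen : (r :: rest).length = (operations.foldl stepB ((r :: rest).map widenRow)).length := by
      rw [l]; simp
    rw [hlen, assemble _ g]
    simp [solution_alt]

-- ===== VERDICT (by name: the statement is the Claim_ definition above) =====
theorem solution_spec : Claim_equal_solution := by
  intro rc operations _ hpre
  refine final rc operations hpre.1 ?_
  rintro ⟨h1, h2, op, hop, hne⟩
  exact hne (hpre.2.2 h1 h2 op hop)
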